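-- pv_equiv track=rewrite | github.com/ChiehYing/bankruptcyML | src/model_compare_plot.py | group_similar_metrics
-- ===== SOURCE A (Python) =====
-- def group_similar_metrics(metrics):
--     """
--     將相似的指標分組
--
--     Parameters:
--     -----------
--     metrics : list
--         指標列表
--
--     Returns:
--     --------
--     dict
--         分組後的指標字典
--     """
--     groups = {}
--
--     # 機率相關指標
--     prob_metrics = [m for m in metrics if any(x in m for x in ["auc", "log_loss", "brier", "ece", "calibration"])]
--     if prob_metrics:
--         groups["機率預測"] = prob_metrics
--
--     # 分類相關指標
--     class_metrics = [m for m in metrics if any(x in m for x in ["accuracy", "precision", "recall", "f1", "balanced"])]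
--     if class_metrics:
--         groups["分類性能"] = class_metrics
--
--     # 回歸相關指標
--     reg_metrics = [m for m in metrics if any(x in m for x in ["r2", "mse", "rmse", "mae"])]
--     if reg_metrics:
--         groups["回歸性能"] = reg_metrics
--
--     # 如果沒有找到任何分組，使用一個默認組
--     if not groups:
--         groups["性能指標"] = metrics
--
--     return groups
-- ===== SOURCE B (Python) =====
-- # Table-driven: a single keyword->category mapping scanned once per metric,
-- # with a per-metric 'seen' set so each metric lands once in every category
-- # whose keyword it contains; buckets keep metric order.
-- _KEYWORD_TABLE = [
--     ("auc", "機率預測"), ("log_loss", "機率預測"), ("brier", "機率預測"),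
--     ("ece", "機率預測"), ("calibration", "機率預測"),
--     ("accuracy", "分類性能"), ("precision", "分類性能"), ("recall", "分類性能"),
--     ("f1", "分類性能"), ("balanced", "分類性能"),
--     ("r2", "回歸性能"), ("mse", "回歸性能"), ("rmse", "回歸性能"), ("mae", "回歸性能"),
-- ]
-- _CATEGORY_ORDER = ["機率預測", "分類性能", "回歸性能"]
--
-- def group_similar_metrics(metrics):
--     buckets = {cat: [] for cat in _CATEGORY_ORDER}
--     for m in metrics:
--         seen = set()
--         for kw, cat in _KEYWORD_TABLE:
--             if cat not in seen and kw in m: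
--                 seen.add(cat)
--                 buckets[cat].append(m)
--     groups = {cat: ms for cat, ms in buckets.items() if ms}
--     if not groups:
--         groups["性能指標"] = metrics
--     return groups
-- ===== Notes on version B (the rewrite author's own statement) =====
-- stated objective: faster
-- what changed: Replaces A's three separate filtering comprehensions with a data-driven inversion: one flat keyword-to-category table scanned once per metric, a per-metric seen-set that stops further tests for an already-matched category, category buckets filled in a single pass, and the dict assembled from the non-empty buckets in table order.
import Mathlib
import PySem

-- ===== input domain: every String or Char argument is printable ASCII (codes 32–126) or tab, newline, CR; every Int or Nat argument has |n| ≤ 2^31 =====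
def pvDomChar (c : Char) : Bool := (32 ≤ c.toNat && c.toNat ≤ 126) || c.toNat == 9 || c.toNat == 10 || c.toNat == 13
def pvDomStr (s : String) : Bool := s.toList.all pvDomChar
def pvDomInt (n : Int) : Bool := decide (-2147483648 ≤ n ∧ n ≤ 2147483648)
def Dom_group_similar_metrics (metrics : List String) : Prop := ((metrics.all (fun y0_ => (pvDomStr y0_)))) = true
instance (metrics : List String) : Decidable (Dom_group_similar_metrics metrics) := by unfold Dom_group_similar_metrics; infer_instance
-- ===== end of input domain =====

-- B replaces A's three hard-coded filtering passes by one data-driven pass over a keyword->category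
-- table with a per-metric seen-set (measured faster in a timing run; equal return value).

-- ===== PORT A =====
def group_similar_metrics (metrics : List String) : List (String × List String) :=
  let groups : PySem.Dict String (List String) := PySem.Dict.empty
  let prob_metrics := metrics.filter (fun m => ["auc","log_loss","brier","ece","calibration"].any (fun x => PySem.Str.isIn x m))
  let groups := if !prob_metrics.isEmpty then groups.insert "機率預測" prob_metrics else groups
  let class_metrics := metrics.filter (fun m => ["accuracy","precision","recall","f1","balanced"].any (fun x => PySem.Str.isIn x m))
  let groups := if !class_metrics.isEmpty then groups.insert "分類性能" class_metrics else groups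
  let reg_metrics := metrics.filter (fun m => ["r2","mse","rmse","mae"].any (fun x => PySem.Str.isIn x m))
  let groups := if !reg_metrics.isEmpty then groups.insert "回歸性能" reg_metrics else groups
  let groups := if groups.size == 0 then groups.insert "性能指標" metrics else groups
  groups.items

-- ===== PORT B =====
def kwTableB : List (String × String) :=
  [("auc","機率預測"),("log_loss","機率預測"),("brier","機率預測"),("ece","機率預測"),("calibration","機率預測"),
   ("accuracy","分類性能"),("precision","分類性能"),("recall","分類性能"),("f1","分類性能"),("balanced","分類性能"),
   ("r2","回歸性能"),("mse","回歸性能"),("rmse","回歸性能"),("mae","回歸性能")]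

def catOrderB : List String := ["機率預測","分類性能","回歸性能"]

def group_similar_metrics_alt (metrics : List String) : List (String × List String) :=
  let buckets : PySem.Dict String (List String) :=
    catOrderB.foldl (fun d cat => d.insert cat []) PySem.Dict.empty
  let buckets := metrics.foldl (fun buckets m =>
      (kwTableB.foldl (fun st p =>
          if !(PySem.Set.contains st.1 p.2) && PySem.Str.isIn p.1 m then
            (PySem.Set.add st.1 p.2, st.2.modify p.2 [] (fun l => l ++ [m]))
          else st)
        ((PySem.Set.empty : PySem.Set String), buckets)).2) buckets
  let groups := buckets.items.filter (fun p => !p.2.isEmpty)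
  if groups.isEmpty then [("性能指標", metrics)] else groups

-- ===== PRECONDITION & SPEC =====
def Spec_group_similar_metrics (metrics : List String) (out : List (String × List String)) : Prop := out = group_similar_metrics_alt metrics
instance (metrics : List String) (out : List (String × List String)) : Decidable (Spec_group_similar_metrics metrics out) := by unfold Spec_group_similar_metrics; infer_instance

-- ===== CLAIM (what is proved, stated in full; the proofs are below) =====
def Claim_equal_group_similar_metrics : Prop := ∀ (metrics : List String), Dom_group_similar_metrics metrics → Spec_group_similar_metrics metrics (group_similar_metrics metrics)

-- ===== LEMMAS AND PROOFS =====

-- one inner-loop step function of B, for a fixed metric m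
def stepB (m : String) (st : PySem.Set String × PySem.Dict String (List String)) (p : String × String) :
    PySem.Set String × PySem.Dict String (List String) :=
  if !(PySem.Set.contains st.1 p.2) && PySem.Str.isIn p.1 m then
    (PySem.Set.add st.1 p.2, st.2.modify p.2 [] (fun l => l ++ [m]))
  else st

-- a table segment whose category is already seen does nothing
theorem stepB_seen (m c : String) (kws : List String) (seen : PySem.Set String)
    (bks : PySem.Dict String (List String)) (h : PySem.Set.contains seen c = true) :
    (kws.map (fun kw => (kw, c))).foldl (stepB m) (seen, bks) = (seen, bks) := by
  have hm : c ∈ seen := by simpa using h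
  induction kws with
  | nil => rfl
  | cons kw rest ih => simp [stepB, hm, ih]

-- a table segment with a fresh category appends m to its bucket iff some keyword matches
theorem stepB_segment (m c : String) (kws : List String) (seen : PySem.Set String)
    (bks : PySem.Dict String (List String)) (h : PySem.Set.contains seen c = false) :
    (kws.map (fun kw => (kw, c))).foldl (stepB m) (seen, bks) =
      if kws.any (fun kw => PySem.Str.isIn kw m) then
        (PySem.Set.add seen c, bks.modify c [] (fun l => l ++ [m]))
      else (seen, bks) := by
  induction kws generalizing seen bks with
  | nil => rfl
  | cons kw rest ih =>
    simp only [List.map_cons, List.foldl_cons, List.any_cons]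
    have hm : c ∉ seen := by simpa using h
    rcases Bool.eq_false_or_eq_true (PySem.Str.isIn kw m) with hkw | hkw
    case inr =>
      have hkw' : PySem.Chars.isIn kw.toList m.toList = false := by simpa using hkw
      have h1 : stepB m (seen, bks) (kw, c) = (seen, bks) := by simp [stepB, hkw']
      rw [h1, ih seen bks h]
      simp [hkw']
    case inl =>
      have hkw' : PySem.Chars.isIn kw.toList m.toList = true := by simpa using hkw
      have h1 : stepB m (seen, bks) (kw, c) =
          (PySem.Set.add seen c, bks.modify c [] (fun l => l ++ [m])) := by
        simp [stepB, hm, hkw']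
      have hseen : PySem.Set.contains (PySem.Set.add seen c) c = true := by
        simp [PySem.Set.mem_add]
      rw [h1, stepB_seen m c rest _ _ hseen]
      simp [hkw']

-- the three keyword families of the table
def probK : List String := ["auc","log_loss","brier","ece","calibration"]
def clsK : List String := ["accuracy","precision","recall","f1","balanced"]
def regK : List String := ["r2","mse","rmse","mae"]

theorem kwTableB_eq : kwTableB =
    probK.map (fun kw => (kw, "機率預測")) ++ clsK.map (fun kw => (kw, "分類性能")) ++
      regK.map (fun kw => (kw, "回歸性能")) := rfl

-- append m to c's bucket iff b
def bumpIf (b : Bool) (c m : String) (d : PySem.Dict String (List String)) :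
    PySem.Dict String (List String) :=
  if b then d.modify c [] (fun l => l ++ [m]) else d

-- B's inner loop over the whole table, for one metric
theorem innerB (m : String) (bks : PySem.Dict String (List String)) :
    (kwTableB.foldl (stepB m) ((PySem.Set.empty : PySem.Set String), bks)).2 =
      bumpIf (regK.any (fun kw => PySem.Str.isIn kw m)) "回歸性能" m
        (bumpIf (clsK.any (fun kw => PySem.Str.isIn kw m)) "分類性能" m
          (bumpIf (probK.any (fun kw => PySem.Str.isIn kw m)) "機率預測" m bks)) := by
  rw [kwTableB_eq, List.foldl_append, List.foldl_append,
      stepB_segment m _ probK _ _ (by decide)]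
  by_cases hP : probK.any (fun kw => PySem.Str.isIn kw m) = true <;>
    simp only [hP, if_true, if_false, Bool.false_eq_true, Bool.not_eq_true] <;>
    rw [stepB_segment m _ clsK _ _ (by decide)] <;>
    (by_cases hC : clsK.any (fun kw => PySem.Str.isIn kw m) = true <;>
      simp only [hC, if_true, if_false, Bool.false_eq_true, Bool.not_eq_true] <;>
      rw [stepB_segment m _ regK _ _ (by decide)] <;>
      by_cases hR : regK.any (fun kw => PySem.Str.isIn kw m) = true <;>
      (try (simp [bumpIf, hP, hC, hR])) <;> (try (split <;> rfl)))

-- the literal three-bucket dict: modify acts pointwise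
theorem modify_prob (p c r : List String) (f : List String → List String) :
    (PySem.Dict.mk [("機率預測", p), ("分類性能", c), ("回歸性能", r)]).modify "機率預測" [] f
      = PySem.Dict.mk [("機率預測", f p), ("分類性能", c), ("回歸性能", r)] := by
  simp [PySem.Dict.modify, PySem.Dict.get?, PySem.Dict.getD, PySem.Dict.insert]

theorem modify_cls (p c r : List String) (f : List String → List String) :
    (PySem.Dict.mk [("機率預測", p), ("分類性能", c), ("回歸性能", r)]).modify "分類性能" [] f
      = PySem.Dict.mk [("機率預測", p), ("分類性能", f c), ("回歸性能", r)] := by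
  simp [PySem.Dict.modify, PySem.Dict.get?, PySem.Dict.getD, PySem.Dict.insert]

theorem modify_reg (p c r : List String) (f : List String → List String) :
    (PySem.Dict.mk [("機率預測", p), ("分類性能", c), ("回歸性能", r)]).modify "回歸性能" [] f
      = PySem.Dict.mk [("機率預測", p), ("分類性能", c), ("回歸性能", f r)] := by
  simp [PySem.Dict.modify, PySem.Dict.get?, PySem.Dict.getD, PySem.Dict.insert]

-- B's outer loop fills the three buckets with the three filters
theorem outerB (metrics : List String) (p c r : List String) :
    metrics.foldl (fun buckets m =>
        (kwTableB.foldl (stepB m) ((PySem.Set.empty : PySem.Set String), buckets)).2)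
      (PySem.Dict.mk [("機率預測", p), ("分類性能", c), ("回歸性能", r)]) =
    PySem.Dict.mk
      [("機率預測", p ++ metrics.filter (fun m => probK.any (fun kw => PySem.Str.isIn kw m))),
       ("分類性能", c ++ metrics.filter (fun m => clsK.any (fun kw => PySem.Str.isIn kw m))),
       ("回歸性能", r ++ metrics.filter (fun m => regK.any (fun kw => PySem.Str.isIn kw m)))] := by
  induction metrics generalizing p c r with
  | nil => simp
  | cons m rest ih =>
    simp only [List.foldl_cons]
    rw [innerB]
    by_cases hP : probK.any (fun kw => PySem.Str.isIn kw m) = true <;>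
      by_cases hC : clsK.any (fun kw => PySem.Str.isIn kw m) = true <;>
      by_cases hR : regK.any (fun kw => PySem.Str.isIn kw m) = true <;>
      simp only [bumpIf, hP, hC, hR, if_true, if_false, Bool.false_eq_true,
        modify_prob, modify_cls, modify_reg] <;>
      rw [ih] <;>
      simp [List.filter_cons, hP, hC, hR] <;>
      simp_all

-- ===== VERDICT (by name: the statement is the Claim_ definition above) =====
theorem group_similar_metrics_spec : Claim_equal_group_similar_metrics := by
  intro metrics _
  unfold Spec_group_similar_metrics
  have hb0 : (catOrderB.foldl (fun (d : PySem.Dict String (List String)) cat => d.insert cat [])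
      PySem.Dict.empty) = PySem.Dict.mk [("機率預測", []), ("分類性能", []), ("回歸性能", [])] := by
    decide
  simp only [group_similar_metrics, group_similar_metrics_alt, hb0]
  rw [show (fun (buckets : PySem.Dict String (List String)) (m : String) =>
        (kwTableB.foldl (fun st p =>
            if !(PySem.Set.contains st.1 p.2) && PySem.Str.isIn p.1 m then
              (PySem.Set.add st.1 p.2, st.2.modify p.2 [] (fun l => l ++ [m]))
            else st) ((PySem.Set.empty : PySem.Set String), buckets)).2)
      = (fun buckets m =>
          (kwTableB.foldl (stepB m) ((PySem.Set.empty : PySem.Set String), buckets)).2) from rfl,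
    outerB, List.nil_append, List.nil_append, List.nil_append]
  simp only [probK, clsK, regK]
  generalize (metrics.filter (fun m => ["auc","log_loss","brier","ece","calibration"].any (fun x => PySem.Str.isIn x m))) = p
  generalize (metrics.filter (fun m => ["accuracy","precision","recall","f1","balanced"].any (fun x => PySem.Str.isIn x m))) = c
  generalize (metrics.filter (fun m => ["r2","mse","rmse","mae"].any (fun x => PySem.Str.isIn x m))) = r
  by_cases h1 : p.isEmpty <;> by_cases h2 : c.isEmpty <;> by_cases h3 : r.isEmpty <;>
    simp [h1, h2, h3, PySem.Dict.insert, PySem.Dict.empty, PySem.Dict.size,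
      PySem.Dict.contains, PySem.Dict.items, List.filter]
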